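-- pv_equiv track=rewrite | github.com/ShashankBejjanki1241/GIZMO | orchestrator/engine.py | _validate_diff_format
-- ===== SOURCE A (Python) =====
-- def _validate_diff_format(content: str) -> bool:
--     """Validate unified diff format"""
--     lines = content.split('\n')
--
--     # Check for basic diff structure
--     if not any(line.startswith('--- a/') for line in lines):
--         return False
--
--     if not any(line.startswith('+++ b/') for line in lines):
--         return False
--
--     if not any(line.startswith('@@') for line in lines):
--         return False
--
--     # Check for COMMIT line
--     if not any('COMMIT:' in line for line in lines):
--         return False
--
--     # Check size limit
--     if len(lines) > 50:
--         return False
--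
--     return True
-- ===== SOURCE B (Python) =====
-- def _validate_diff_format(content: str) -> bool:
--     """Whole-string validation: no line splitting; each required marker is
--     found by an anchored substring search on the full text (a marker starts
--     a line iff it is at position 0 or right after a newline), and the size
--     limit is read off the newline count."""
--     def at_line_start(prefix):
--         return content.startswith(prefix) or ('\n' + prefix) in content
--     return (at_line_start('--- a/')
--             and at_line_start('+++ b/')
--             and at_line_start('@@')
--             and 'COMMIT:' in content
--             and content.count('\n') <= 49)
-- ===== Notes on version B (the rewrite author's own statement) =====
-- stated objective: alternative
-- what changed: B never splits the text into lines: each line-start marker is located by an anchored substring search on the whole string (prefix at position 0 or occurrence of '\n'+marker), membership of 'COMMIT:' is a plain substring test on the full text, and the 50-line cap becomes content.count('\n') <= 49; no line list is ever built.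
import Mathlib
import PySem

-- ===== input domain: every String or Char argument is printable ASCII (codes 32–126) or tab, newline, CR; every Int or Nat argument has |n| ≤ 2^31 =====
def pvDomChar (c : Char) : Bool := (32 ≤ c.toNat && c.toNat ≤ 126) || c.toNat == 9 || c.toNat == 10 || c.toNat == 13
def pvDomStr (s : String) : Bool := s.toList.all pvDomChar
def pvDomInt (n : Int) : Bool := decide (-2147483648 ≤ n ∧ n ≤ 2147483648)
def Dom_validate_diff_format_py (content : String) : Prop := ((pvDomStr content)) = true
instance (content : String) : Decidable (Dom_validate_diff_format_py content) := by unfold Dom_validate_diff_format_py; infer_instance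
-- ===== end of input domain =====

-- B validates the diff without building the line list: each line-start marker is found by an
-- anchored whole-string substring search and the 50-line cap becomes a newline count (alternative
-- decomposition, same return value; equality proved below).

-- ===== PORT A =====
def validate_diff_format_py (content : String) : Bool :=
  let lines := PySem.Chars.splitOn content.toList "\n".toList
  if !(lines.any (fun line => PySem.Chars.startswith line "--- a/".toList)) then false
  else if !(lines.any (fun line => PySem.Chars.startswith line "+++ b/".toList)) then false
  else if !(lines.any (fun line => PySem.Chars.startswith line "@@".toList)) then false
  else if !(lines.any (fun line => PySem.Chars.isIn "COMMIT:".toList line)) then false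
  else if lines.length > 50 then false
  else true

-- ===== PORT B =====
-- B's helper at_line_start(prefix): content.startswith(prefix) or ('\n' + prefix) in content
def pvAtLineStart (cs : List Char) (p : List Char) : Bool :=
  PySem.Chars.startswith cs p || PySem.Chars.isIn ('\n' :: p) cs

def validate_diff_format_py_alt (content : String) : Bool :=
  let cs := content.toList
  pvAtLineStart cs "--- a/".toList &&
  pvAtLineStart cs "+++ b/".toList &&
  pvAtLineStart cs "@@".toList &&
  PySem.Chars.isIn "COMMIT:".toList cs &&
  decide (PySem.Chars.count cs "\n".toList ≤ 49)

-- ===== PRECONDITION & SPEC =====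
def Spec_validate_diff_format_py (content : String) (out : Bool) : Prop := out = validate_diff_format_py_alt content
instance (content : String) (out : Bool) : Decidable (Spec_validate_diff_format_py content out) := by unfold Spec_validate_diff_format_py; infer_instance

-- ===== CLAIM (what is proved, stated in full; the proofs are below) =====
def Claim_equal_validate_diff_format_py : Prop := ∀ (content : String), Dom_validate_diff_format_py content → Spec_validate_diff_format_py content (validate_diff_format_py content)

-- ===== LEMMAS AND PROOFS =====


def pvSplit1 (c : Char) : List Char → List Char → List (List Char)
  | [], cur => [cur.reverse]
  | x :: rest, cur =>
      if x = c then cur.reverse :: pvSplit1 c rest [] else pvSplit1 c rest (x :: cur)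

theorem pv_go_split (c : Char) (fuel : Nat) :
    ∀ (l cur : List Char) (acc : List (List Char)), l.length ≤ fuel →
      PySem.Chars.splitOn.go [c] fuel l cur acc = acc.reverse ++ pvSplit1 c l cur := by
  induction fuel with
  | zero =>
    intro l cur acc h
    have : l = [] := List.eq_nil_of_length_eq_zero (Nat.le_zero.mp h)
    subst this
    simp [PySem.Chars.splitOn.go, pvSplit1]
  | succ n ih =>
    intro l cur acc h
    cases l with
    | nil => simp [PySem.Chars.splitOn.go, pvSplit1]
    | cons x rest =>
      simp only [PySem.Chars.splitOn.go, pvSplit1, List.isPrefixOf, List.length_cons] at *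
      by_cases hx : x = c
      · subst hx
        simp only [beq_self_eq_true, Bool.true_and, if_pos, List.length_nil,
          Nat.zero_add, List.drop_one, List.tail_cons]
        rw [ih _ _ _ (by omega)]
        simp
      · rw [if_neg (by simp; exact fun hh => hx hh.symm), if_neg hx]
        rw [ih _ _ _ (by omega)]

theorem pv_splitOn_eq (c : Char) (s : List Char) :
    PySem.Chars.splitOn s [c] = pvSplit1 c s [] := by
  rw [PySem.Chars.splitOn, pv_go_split c _ _ _ _ (by omega)]
  simp

theorem pv_go_count (c : Char) (fuel : Nat) :
    ∀ (l : List Char) (acc : Nat), l.length ≤ fuel →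
      PySem.Chars.count.go [c] fuel l acc = acc + l.count c := by
  induction fuel with
  | zero =>
    intro l acc h
    have : l = [] := List.eq_nil_of_length_eq_zero (Nat.le_zero.mp h)
    subst this
    simp [PySem.Chars.count.go]
  | succ n ih =>
    intro l acc h
    cases l with
    | nil => simp [PySem.Chars.count.go]
    | cons x rest =>
      simp only [PySem.Chars.count.go, List.isPrefixOf, List.length_cons] at *
      by_cases hx : x = c
      · subst hx
        simp only [beq_self_eq_true, Bool.true_and, if_pos, List.length_nil,
          Nat.zero_add, List.drop_one, List.tail_cons]
        rw [ih _ _ (by omega)]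
        simp
        omega
      · rw [if_neg (by simp; exact fun hh => hx hh.symm)]
        rw [ih _ _ (by omega)]
        simp [hx]

theorem pv_count_eq (c : Char) (s : List Char) :
    PySem.Chars.count s [c] = s.count c := by
  rw [PySem.Chars.count]
  simp only [List.isEmpty_cons, if_neg Bool.false_ne_true]
  rw [pv_go_count c _ _ _ (le_refl _)]
  simp

-- L1
theorem pv_prefix_split {c : Char} {p u v : List Char} (hc : c ∉ p) :
    p <+: (u ++ c :: v) ↔ p <+: u := by
  constructor
  · intro h
    by_cases hl : p.length ≤ u.length
    · rw [List.prefix_iff_eq_take] at h ⊢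
      rw [h, List.take_append]
      simp [Nat.sub_eq_zero_of_le hl]
    · exfalso
      apply hc
      have hlen : u.length < p.length := by omega
      have hlt : u.length < (u ++ c :: v).length := by simp
      have := h.getElem hlen
      rw [List.getElem_append_right (le_refl _)] at this
      simp at this
      rw [← this]
      exact List.getElem_mem _
  · intro h
    exact h.trans (List.prefix_append _ _)

-- L3
theorem pv_isIn_cons_false {c : Char} {p u : List Char} (hu : c ∉ u) :
    PySem.Chars.isIn (c :: p) u = false := by
  rw [PySem.Chars.isIn_eq_false_iff]
  intro h
  exact hu (h.mem (List.mem_cons_self))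

-- L2
theorem pv_isIn_split {c : Char} {p u v : List Char} (hc : c ∉ p) :
    PySem.Chars.isIn p (u ++ c :: v) = (PySem.Chars.isIn p u || PySem.Chars.isIn p v) := by
  by_cases h : PySem.Chars.isIn p (u ++ c :: v) = true
  · rw [h]
    obtain ⟨j, hj⟩ := (PySem.Chars.exists_prefix_drop_iff_isIn p (u ++ c :: v)).mpr h
    rw [List.drop_append] at hj
    by_cases hju : j ≤ u.length
    · rw [Nat.sub_eq_zero_of_le hju] at hj
      simp only [List.drop_zero] at hj
      have : p <+: u.drop j := (pv_prefix_split hc).mp hj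
      have : PySem.Chars.isIn p u = true :=
        (PySem.Chars.exists_prefix_drop_iff_isIn p u).mp ⟨j, this⟩
      simp [this]
    · have hd : u.drop j = [] := List.drop_eq_nil_of_le (by omega)
      rw [hd, List.nil_append] at hj
      have hk : j - u.length = (j - u.length - 1) + 1 := by omega
      rw [hk, List.drop_succ_cons] at hj
      have : PySem.Chars.isIn p v = true :=
        (PySem.Chars.exists_prefix_drop_iff_isIn p v).mp ⟨_, hj⟩
      simp [this]
  · rw [eq_false_of_ne_true h]
    have hnot := h
    rw [← PySem.Chars.exists_prefix_drop_iff_isIn] at hnot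
    push_neg at hnot
    have h1 : PySem.Chars.isIn p u = false := by
      rw [PySem.Chars.isIn_eq_false_iff]
      intro hin
      obtain ⟨j, hj⟩ := (PySem.Chars.exists_prefix_drop_iff_isIn p u).mpr
        ((PySem.Chars.isIn_iff_infix p u).mpr hin)
      exact hnot j (by
        rw [List.drop_append]
        exact hj.trans (List.prefix_append _ _))
    have h2 : PySem.Chars.isIn p v = false := by
      rw [PySem.Chars.isIn_eq_false_iff]
      intro hin
      obtain ⟨j, hj⟩ := (PySem.Chars.exists_prefix_drop_iff_isIn p v).mpr
        ((PySem.Chars.isIn_iff_infix p v).mpr hin)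
      apply hnot (u.length + 1 + j)
      rw [List.drop_append, List.drop_eq_nil_of_le (by omega), List.nil_append]
      have : u.length + 1 + j - u.length = j + 1 := by omega
      rw [this, List.drop_succ_cons]
      exact hj
    simp [h1, h2]

-- L4
theorem pv_isIn_anchor {c : Char} {p u v : List Char} (hc : c ∉ p) (hu : c ∉ u) :
    PySem.Chars.isIn (c :: p) (u ++ c :: v)
      = (PySem.Chars.startswith v p || PySem.Chars.isIn (c :: p) v) := by
  by_cases h : PySem.Chars.isIn (c :: p) (u ++ c :: v) = true
  · rw [h]
    obtain ⟨j, hj⟩ := (PySem.Chars.exists_prefix_drop_iff_isIn _ _).mpr h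
    rw [List.drop_append] at hj
    by_cases hju : j < u.length
    · exfalso
      rw [Nat.sub_eq_zero_of_le (by omega), List.drop_zero] at hj
      have hne : u.drop j ≠ [] := by
        intro hx
        have := congrArg List.length hx
        simp at this
        omega
      obtain ⟨y, ys, hys⟩ := List.exists_cons_of_ne_nil hne
      rw [hys, List.cons_append] at hj
      have : c = y := (List.cons_prefix_cons.mp hj).1
      apply hu
      rw [this, ← List.take_append_drop j u, hys]
      simp
    · by_cases hje : j = u.length
      · subst hje
        rw [Nat.sub_self, List.drop_eq_nil_of_le (le_refl _), List.nil_append,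
          List.drop_zero, List.cons_prefix_cons] at hj
        have : PySem.Chars.startswith v p = true := by
          rw [PySem.Chars.startswith_iff]; exact hj.2
        simp [this]
      · have hk : j - u.length = (j - u.length - 1) + 1 := by omega
        rw [List.drop_eq_nil_of_le (by omega), List.nil_append, hk,
          List.drop_succ_cons] at hj
        have : PySem.Chars.isIn (c :: p) v = true :=
          (PySem.Chars.exists_prefix_drop_iff_isIn _ _).mp ⟨_, hj⟩
        simp [this]
  · rw [eq_false_of_ne_true h]
    have hnot := h
    rw [← PySem.Chars.exists_prefix_drop_iff_isIn] at hnot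
    push_neg at hnot
    have h1 : PySem.Chars.startswith v p = false := by
      cases hb : PySem.Chars.startswith v p
      · rfl
      exfalso
      have hx' : p <+: v := (PySem.Chars.startswith_iff v p).mp hb
      apply hnot u.length
      rw [List.drop_append, Nat.sub_self, List.drop_eq_nil_of_le (le_refl _),
        List.nil_append, List.drop_zero, List.cons_prefix_cons]
      exact ⟨rfl, hx'⟩
    have h2 : PySem.Chars.isIn (c :: p) v = false := by
      rw [PySem.Chars.isIn_eq_false_iff]
      intro hin
      obtain ⟨j, hj⟩ := (PySem.Chars.exists_prefix_drop_iff_isIn _ _).mpr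
        ((PySem.Chars.isIn_iff_infix _ _).mpr hin)
      apply hnot (u.length + 1 + j)
      rw [List.drop_append, List.drop_eq_nil_of_le (by omega), List.nil_append]
      have : u.length + 1 + j - u.length = j + 1 := by omega
      rw [this, List.drop_succ_cons]
      exact hj
    simp [h1, h2]

theorem pv_split1_length (c : Char) :
    ∀ (s cur : List Char), (pvSplit1 c s cur).length = s.count c + 1 := by
  intro s
  induction s with
  | nil => intro cur; simp [pvSplit1]
  | cons x rest ih =>
    intro cur
    by_cases hx : x = c
    · subst hx
      simp [pvSplit1, ih, List.count_cons]
    · simp [pvSplit1, hx, ih, List.count_cons]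

theorem pv_split1_any_starts (c : Char) (p : List Char) (hc : c ∉ p) :
    ∀ (s cur : List Char), c ∉ cur →
      (pvSplit1 c s cur).any (fun l => PySem.Chars.startswith l p)
        = (PySem.Chars.startswith (cur.reverse ++ s) p
           || PySem.Chars.isIn (c :: p) (cur.reverse ++ s)) := by
  intro s
  induction s with
  | nil =>
    intro cur hcur
    have h3 : c ∉ cur.reverse := by simpa using hcur
    simp [pvSplit1, pv_isIn_cons_false h3]
  | cons x rest ih =>
    intro cur hcur
    by_cases hx : x = c
    · subst hx
      have hcr : x ∉ cur.reverse := by simpa using hcur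
      rw [show pvSplit1 x (x :: rest) cur = cur.reverse :: pvSplit1 x rest [] by
        simp [pvSplit1]]
      rw [List.any_cons, ih [] (by simp)]
      have hpre : PySem.Chars.startswith (cur.reverse ++ x :: rest) p
          = PySem.Chars.startswith cur.reverse p := by
        cases hb : PySem.Chars.startswith cur.reverse p
        · cases hb2 : PySem.Chars.startswith (cur.reverse ++ x :: rest) p
          · rfl
          · exfalso
            have := (pv_prefix_split hc).mp ((PySem.Chars.startswith_iff _ _).mp hb2)
            rw [← PySem.Chars.startswith_iff] at this
            simp [this] at hb
        · have := (pv_prefix_split (v := rest) hc).mpr ((PySem.Chars.startswith_iff _ _).mp hb)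
          rw [← PySem.Chars.startswith_iff] at this
          simp [this]
      rw [hpre, pv_isIn_anchor hc hcr]
      cases h1 : PySem.Chars.startswith cur.reverse p <;>
        cases h2 : PySem.Chars.startswith rest p <;>
          cases h3 : PySem.Chars.isIn (x :: p) rest <;> simp [h1, h2, h3]
    · rw [show pvSplit1 c (x :: rest) cur = pvSplit1 c rest (x :: cur) by
        simp [pvSplit1, hx]]
      rw [ih (x :: cur) (by simp [hcur]; exact fun hh => hx hh.symm)]
      simp

theorem pv_split1_any_isIn (c : Char) (q : List Char) (hc : c ∉ q) :
    ∀ (s cur : List Char), c ∉ cur →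
      (pvSplit1 c s cur).any (fun l => PySem.Chars.isIn q l)
        = PySem.Chars.isIn q (cur.reverse ++ s) := by
  intro s
  induction s with
  | nil =>
    intro cur hcur
    simp [pvSplit1]
  | cons x rest ih =>
    intro cur hcur
    by_cases hx : x = c
    · subst hx
      rw [show pvSplit1 x (x :: rest) cur = cur.reverse :: pvSplit1 x rest [] by
        simp [pvSplit1]]
      rw [List.any_cons, ih [] (by simp), pv_isIn_split hc]
      simp
    · rw [show pvSplit1 c (x :: rest) cur = pvSplit1 c rest (x :: cur) by
        simp [pvSplit1, hx]]
      rw [ih (x :: cur) (by simp [hcur]; exact fun hh => hx hh.symm)]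
      simp

theorem pv_chain (a1 a2 a3 a4 : Bool) (n : Nat) :
    (if !a1 then false else if !a2 then false else if !a3 then false
     else if !a4 then false else if n + 1 > 50 then false else true)
    = (a1 && a2 && a3 && a4 && decide (n ≤ 49)) := by
  cases a1 <;> cases a2 <;> cases a3 <;> cases a4 <;> simp
  by_cases h : n ≤ 49 <;> simp [h] <;> omega

theorem pv_main (content : String) :
    validate_diff_format_py content = validate_diff_format_py_alt content := by
  unfold validate_diff_format_py validate_diff_format_py_alt pvAtLineStart
  simp only [show ("\n".toList) = ['\n'] from rfl]
  rw [pv_splitOn_eq '\n' content.toList]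
  rw [pv_split1_any_starts '\n' "--- a/".toList (by decide) content.toList [] (by decide)]
  rw [pv_split1_any_starts '\n' "+++ b/".toList (by decide) content.toList [] (by decide)]
  rw [pv_split1_any_starts '\n' "@@".toList (by decide) content.toList [] (by decide)]
  rw [pv_split1_any_isIn '\n' "COMMIT:".toList (by decide) content.toList [] (by decide)]
  rw [pv_split1_length '\n' content.toList []]
  rw [pv_count_eq '\n' content.toList]
  simp only [List.reverse_nil, List.nil_append]
  exact pv_chain _ _ _ _ _

-- ===== VERDICT (by name: the statement is the Claim_ definition above) =====
theorem validate_diff_format_py_spec : Claim_equal_validate_diff_format_py := by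
  intro content _
  exact pv_main content
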